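-- pv_equiv track=rewrite | github.com/ACea15/FENIAX | fem4inas/preprocessor/utils.py | compute_dof2insert
-- ===== SOURCE A (Python) =====
-- def compute_dof2insert(free_dof):
--
--     j=0
--     dof2insert = []
--     for i in range(6):
--         if i in free_dof:
--             j +=1
--         else:
--             dof2insert.append(j)
--     return dof2insert
-- ===== SOURCE B (Python) =====
-- def compute_dof2insert(free_dof):
--     return [sum(1 for k in range(i) if k in free_dof)
--             for i in range(6) if i not in free_dof]
-- ===== Notes on version B (the rewrite author's own statement) =====
-- stated objective: alternative
-- what changed: Replaces the single running-accumulator pass (mutable counter j plus append) with a nested recount: a comprehension over the 6 indices that, for each non-free index i, recounts how many indices below i are free.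
import Mathlib
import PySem

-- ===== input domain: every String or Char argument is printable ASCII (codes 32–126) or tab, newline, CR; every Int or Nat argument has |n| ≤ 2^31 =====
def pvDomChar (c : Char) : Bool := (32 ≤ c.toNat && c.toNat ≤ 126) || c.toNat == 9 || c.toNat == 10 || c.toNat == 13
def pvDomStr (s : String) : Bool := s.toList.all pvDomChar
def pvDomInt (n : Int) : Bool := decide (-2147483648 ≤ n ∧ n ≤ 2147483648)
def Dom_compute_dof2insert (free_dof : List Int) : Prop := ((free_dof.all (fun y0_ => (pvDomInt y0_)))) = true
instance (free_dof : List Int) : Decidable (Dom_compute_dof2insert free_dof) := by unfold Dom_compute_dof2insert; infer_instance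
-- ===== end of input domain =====

-- B rebuilds the offsets by a nested recount per non-free index instead of A's running counter (alternative decomposition, same result).\nimport Mathlib


-- ===== PORT A =====
-- A: single pass over range(6) with a running counter j, appending j at each non-free index.
def compute_dof2insert (free_dof : List Int) : List Int :=
  (((PySem.List.pyRange 0 6 1).foldl
    (fun (s : Int × List Int) i =>
      if free_dof.contains i then (s.1 + 1, s.2) else (s.1, s.2 ++ [s.1]))
    (0, []))).2

-- ===== PORT B =====
-- B: nested recount — for each non-free i in range(6), sum 1 over k in range(i) with k free.
def compute_dof2insert_alt (free_dof : List Int) : List Int :=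
  ((PySem.List.pyRange 0 6 1).filter (fun i => !(free_dof.contains i))).map
    (fun i => (PySem.List.pyRange 0 i 1).foldl
      (fun acc k => if free_dof.contains k then acc + 1 else acc) (0 : Int))

-- ===== PRECONDITION & SPEC =====
def Spec_compute_dof2insert (free_dof : List Int) (out : List Int) : Prop := out = compute_dof2insert_alt free_dof
instance (free_dof : List Int) (out : List Int) : Decidable (Spec_compute_dof2insert free_dof out) := by unfold Spec_compute_dof2insert; infer_instance

-- ===== CLAIM (what is proved, stated in full; the proofs are below) =====
def Claim_equal_compute_dof2insert : Prop := ∀ (free_dof : List Int), Dom_compute_dof2insert free_dof → Spec_compute_dof2insert free_dof (compute_dof2insert free_dof)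

-- ===== LEMMAS AND PROOFS =====

-- ===== VERDICT (by name: the statement is the Claim_ definition above) =====
theorem compute_dof2insert_spec : Claim_equal_compute_dof2insert := by
  intro free_dof _
  unfold Spec_compute_dof2insert compute_dof2insert compute_dof2insert_alt
  have hr : PySem.List.pyRange 0 6 1 = [0, 1, 2, 3, 4, 5] := by decide
  have h1r : PySem.List.pyRange 0 1 1 = [0] := by decide
  have h2r : PySem.List.pyRange 0 2 1 = [0, 1] := by decide
  have h3r : PySem.List.pyRange 0 3 1 = [0, 1, 2] := by decide
  have h4r : PySem.List.pyRange 0 4 1 = [0, 1, 2, 3] := by decide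
  have h5r : PySem.List.pyRange 0 5 1 = [0, 1, 2, 3, 4] := by decide
  have h0r : PySem.List.pyRange 0 0 1 = [] := by decide
  cases h0 : free_dof.contains 0 <;> cases h1 : free_dof.contains 1 <;>
    cases h2 : free_dof.contains 2 <;> cases h3 : free_dof.contains 3 <;>
    cases h4 : free_dof.contains 4 <;> cases h5 : free_dof.contains 5 <;>
    simp only [hr, List.foldl_cons, List.foldl_nil, List.filter_cons, List.filter_nil,
      List.map_cons, List.map_nil, h0, h1, h2, h3, h4, h5, Bool.not_true, Bool.not_false,
      if_true, if_false, cond_true, cond_false, h0r, h1r, h2r, h3r, h4r, h5r] <;>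
    simp only [List.contains_eq_mem, decide_eq_true_eq, decide_eq_false_iff_not]
      at h0 h1 h2 h3 h4 h5 <;>
    simp [h0, h1, h2, h3, h4, h5, h0r, h1r, h2r, h3r, h4r, h5r]
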